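-- pv_equiv track=rewrite | github.com/jakub-m/sudoku-generator | sudoku.py | iter_disjoint_indices
-- ===== SOURCE A (Python) =====
-- EMPTY_FIELD = '.'
--
-- def iter_disjoint_indices(line):
--     '''EMPTY_FIELD in line means a break between indices. A break should result
--     in a separate Segment.'''
--     indices = set()
--     for i, c in enumerate(line):
--         if c is EMPTY_FIELD:
--             if indices:
--                 yield indices
--                 indices = set()
--         else:
--             indices.add(i)
--     if indices:
--         yield indices
-- ===== SOURCE B (Python) =====
-- EMPTY_FIELD = '.'
--
--
-- def iter_disjoint_indices(line):
--     '''Two-pointer segment scan: skip empty fields, then scan the whole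
--     non-empty run at once and emit its index range as a set.'''
--     i, n = 0, len(line)
--     while i < n:
--         if line[i] is EMPTY_FIELD:
--             i += 1
--         else:
--             j = i + 1
--             while j < n and line[j] is not EMPTY_FIELD:
--                 j += 1
--             yield set(range(i, j))
--             i = j
-- ===== Notes on version B (the rewrite author's own statement) =====
-- stated objective: alternative
-- what changed: Replaces A's accumulate-a-set-and-flush-at-each-break single loop by a two-pointer segmentation: skip empty fields, then scan each contiguous non-empty run in one inner pass and emit its index range directly.
import Mathlib
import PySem

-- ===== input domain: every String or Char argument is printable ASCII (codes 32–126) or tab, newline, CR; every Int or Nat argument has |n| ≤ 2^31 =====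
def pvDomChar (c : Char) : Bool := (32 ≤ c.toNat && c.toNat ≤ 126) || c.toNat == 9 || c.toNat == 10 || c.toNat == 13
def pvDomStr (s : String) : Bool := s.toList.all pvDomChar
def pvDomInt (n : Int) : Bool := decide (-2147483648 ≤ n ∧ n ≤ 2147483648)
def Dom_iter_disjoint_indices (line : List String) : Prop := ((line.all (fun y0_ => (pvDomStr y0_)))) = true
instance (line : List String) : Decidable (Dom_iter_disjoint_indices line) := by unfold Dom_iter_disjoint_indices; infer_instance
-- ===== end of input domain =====

-- B replaces A's accumulate-and-flush-at-break loop by a two-pointer scan that emits each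
-- contiguous non-empty run in one inner pass (objective: alternative decomposition, same cost).
-- Python's `c is EMPTY_FIELD` identity test is ported as string equality with ".", exact for
-- the interned single-character literals these lines hold.

-- ===== PORT A =====
-- A's loop body: on '.', flush the pending index set if non-empty; otherwise add the index.
def aStep (st : List (List Int) × List Int) (p : Int × String) : List (List Int) × List Int :=
  if p.2 == "." then
    (if st.2.isEmpty then st else (st.1 ++ [st.2], []))
  else (st.1, st.2 ++ [p.1])

def iter_disjoint_indices (line : List String) : List (List Int) :=
  let r := (PySem.List.enumerate line).foldl aStep ([], [])
  if r.2.isEmpty then r.1 else r.1 ++ [r.2]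

-- ===== PORT B =====
-- Source B's outer while-loop: skip '.', else scan the whole non-empty run and emit its index range.
def altGo (line : List String) (i : Int) : List (List Int) :=
  match line with
  | [] => []
  | c :: rest =>
    if c == "." then altGo rest (i + 1)
    else
      let t := rest.takeWhile (fun s => !(s == "."))
      ((List.range (t.length + 1)).map (fun (k : Nat) => i + (k : Int))) ::
        altGo (rest.drop t.length) (i + 1 + (t.length : Int))
termination_by line.length
decreasing_by
  all_goals simp [List.length_drop]

def iter_disjoint_indices_alt (line : List String) : List (List Int) :=
  altGo line 0

-- ===== PRECONDITION & SPEC =====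
def Spec_iter_disjoint_indices (line : List String) (out : List (List Int)) : Prop := out = iter_disjoint_indices_alt line
instance (line : List String) (out : List (List Int)) : Decidable (Spec_iter_disjoint_indices line out) := by unfold Spec_iter_disjoint_indices; infer_instance

-- ===== CLAIM (what is proved, stated in full; the proofs are below) =====
def Claim_equal_iter_disjoint_indices : Prop := ∀ (line : List String), Dom_iter_disjoint_indices line → Spec_iter_disjoint_indices line (iter_disjoint_indices line)

-- ===== LEMMAS AND PROOFS =====

-- A's loop written as structural recursion over the line, carrying the pending index set.
def segsWith : List Int → List String → Int → List (List Int)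
  | acc, [], _ => if acc.isEmpty then [] else [acc]
  | acc, c :: rest, i =>
    if c == "." then
      if acc.isEmpty then segsWith [] rest (i + 1) else acc :: segsWith [] rest (i + 1)
    else segsWith (acc ++ [i]) rest (i + 1)

lemma aLoop_eq_segsWith (line : List String) : ∀ (i : Int) (out : List (List Int)) (acc : List Int),
    (let r := (PySem.List.enumerate line i).foldl aStep (out, acc);
     if r.2.isEmpty then r.1 else r.1 ++ [r.2]) = out ++ segsWith acc line i := by
  induction line with
  | nil => intro i out acc; by_cases h : acc.isEmpty <;>
      simp [PySem.List.enumerate_nil, segsWith, h]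
  | cons c rest ih =>
    intro i out acc
    rw [PySem.List.enumerate_cons]
    by_cases hc : c == "."
    · by_cases h : acc.isEmpty
      · have hnil : acc = [] := by simpa using h
        subst hnil
        simp only [List.foldl_cons, aStep, hc, if_pos, h]
        simpa [segsWith, hc] using ih (i + 1) out []
      · simp only [List.foldl_cons, aStep, hc, if_pos, h, if_false, Bool.false_eq_true]
        have := ih (i + 1) (out ++ [acc]) []
        simp only [List.append_assoc] at this
        simpa [segsWith, hc, h] using this
    · simp only [List.foldl_cons, aStep, hc, Bool.false_eq_true]
      simpa [segsWith, hc] using ih (i + 1) out (acc ++ [i])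

lemma map_range_add_succ (i : Int) (n : Nat) :
    (List.range (n + 1)).map (fun (k : Nat) => i + (k : Int)) =
      i :: (List.range n).map (fun (k : Nat) => (i + 1) + (k : Int)) := by
  induction n generalizing i with
  | zero => simp
  | succ m ih =>
    rw [List.range_succ, List.map_append, ih, List.range_succ, List.map_append]
    simp
    ring

-- A non-empty pending set absorbs the whole current non-empty run, then restarts empty.
lemma segsWith_run (rest : List String) : ∀ (i : Int) (acc : List Int), acc.isEmpty = false →
    segsWith acc rest i =
      (acc ++ (List.range (rest.takeWhile (fun s => !(s == "."))).length).map (fun (k : Nat) => i + (k : Int))) ::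
        segsWith [] (rest.drop (rest.takeWhile (fun s => !(s == "."))).length)
          (i + ((rest.takeWhile (fun s => !(s == "."))).length : Int)) := by
  induction rest with
  | nil => intro i acc h; simp [segsWith, h]
  | cons c r ih =>
    intro i acc h
    by_cases hc : c == "."
    · simp [segsWith, hc, h, List.takeWhile]
    · have hacc : (acc ++ [i]).isEmpty = false := by simp
      have key := ih (i + 1) (acc ++ [i]) hacc
      simp only [List.takeWhile_cons, hc, Bool.not_false, if_true,
        List.length_cons, List.drop_succ_cons]
      have hstep : segsWith acc (c :: r) i = segsWith (acc ++ [i]) r (i + 1) := by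
        simp [segsWith, hc]
      rw [hstep, key, map_range_add_succ]
      congr 1
      · simp
      · push_cast; ring_nf

lemma segsWith_eq_altGo (line : List String) (i : Int) :
    segsWith [] line i = altGo line i := by
  match line with
  | [] => simp [segsWith, altGo]
  | c :: rest =>
    by_cases hc : c == "."
    · rw [show segsWith [] (c :: rest) i = segsWith [] rest (i + 1) by simp [segsWith, hc],
        show altGo (c :: rest) i = altGo rest (i + 1) by simp [altGo, hc]]
      exact segsWith_eq_altGo rest (i + 1)
    · rw [show segsWith [] (c :: rest) i = segsWith ([] ++ [i]) rest (i + 1) by simp [segsWith, hc]]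
      rw [segsWith_run rest (i + 1) ([] ++ [i]) (by simp)]
      rw [show altGo (c :: rest) i =
          ((List.range ((rest.takeWhile (fun s => !(s == "."))).length + 1)).map (fun (k : Nat) => i + (k : Int))) ::
            altGo (rest.drop (rest.takeWhile (fun s => !(s == "."))).length)
              (i + 1 + ((rest.takeWhile (fun s => !(s == "."))).length : Int)) by
          rw [altGo]; simp [hc]]
      rw [map_range_add_succ]
      simp only [List.nil_append, List.singleton_append]
      congr 1
      exact segsWith_eq_altGo (rest.drop (rest.takeWhile (fun s => !(s == "."))).length)
        (i + 1 + ((rest.takeWhile (fun s => !(s == "."))).length : Int))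
termination_by line.length
decreasing_by
  all_goals simp [List.length_drop]

-- ===== VERDICT (by name: the statement is the Claim_ definition above) =====
theorem iter_disjoint_indices_spec : Claim_equal_iter_disjoint_indices := by
  intro line _
  unfold Spec_iter_disjoint_indices iter_disjoint_indices iter_disjoint_indices_alt
  rw [aLoop_eq_segsWith line 0 [] []]
  simp [segsWith_eq_altGo]
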